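-- pv_equiv track=rewrite | github.com/oculairmedia/Letta-Matrix | src/matrix/mention_routing.py | strip_reply_fallback
-- ===== SOURCE A (Python) =====
-- def strip_reply_fallback(body: str) -> str:
--     """
--     Remove Matrix reply quoted content, keeping only the new message.
--
--     Matrix replies have format:
--     > <@user:domain> original message
--     > continued quote
--
--     Actual new message here
--     """
--     if not body.startswith('>'):
--         return body
--
--     lines = body.split('\n')
--     new_message_lines = []
--     past_quote = False
--
--     for line in lines:
--         if past_quote:
--             new_message_lines.append(line)
--         elif not line.startswith('>'):
--             past_quote = True
--             if line.strip():
--                 new_message_lines.append(line)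
--
--     return '\n'.join(new_message_lines).strip()
-- ===== SOURCE B (Python) =====
-- def strip_reply_fallback(body: str) -> str:
--     if not body.startswith('>'):
--         return body
--     lines = body.split('\n')
--     i = 0
--     while i < len(lines) and lines[i].startswith('>'):
--         i += 1
--     return '\n'.join(lines[i:]).strip()
-- ===== Notes on version B (the rewrite author's own statement) =====
-- stated objective: simpler
-- what changed: Replaces the stateful past_quote flag loop that classifies and appends lines with an index scan that drops the leading quote-prefixed block and joins-then-strips the remaining slice, relying on the final strip to discard the blank separator line A filters explicitly.
import Mathlib
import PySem

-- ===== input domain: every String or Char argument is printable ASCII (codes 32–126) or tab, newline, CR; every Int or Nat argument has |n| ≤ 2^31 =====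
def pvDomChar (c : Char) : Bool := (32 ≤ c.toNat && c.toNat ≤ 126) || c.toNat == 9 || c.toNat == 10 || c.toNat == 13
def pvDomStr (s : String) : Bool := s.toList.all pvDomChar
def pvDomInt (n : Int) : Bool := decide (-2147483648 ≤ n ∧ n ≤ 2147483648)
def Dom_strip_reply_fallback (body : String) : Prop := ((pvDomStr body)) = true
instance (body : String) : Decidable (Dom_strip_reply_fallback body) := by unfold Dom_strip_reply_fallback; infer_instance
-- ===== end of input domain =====

-- B replaces A's stateful past_quote classification loop by dropping the leading '>'-quote
-- block and join-then-strip of the rest (simpler decomposition; same return value).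


-- ===== PORT A =====
-- A's loop: for each line, if past_quote append; elif not line.startswith('>'):
-- past_quote = True and append the line only if line.strip() is truthy.
def pvStepA (st : Bool × List (List Char)) (line : List Char) : Bool × List (List Char) :=
  if st.1 then (true, st.2 ++ [line])
  else if !(PySem.Chars.startswith line ['>']) then
    (true, if PySem.Chars.strip line ≠ [] then st.2 ++ [line] else st.2)
  else st

def strip_reply_fallback (body : String) : String :=
  if !(PySem.Str.startswith body ">") then body
  else
    let lines := PySem.Chars.splitOn body.toList ['\n']
    let st := lines.foldl pvStepA (false, [])
    String.ofList (PySem.Chars.strip (PySem.Chars.join ['\n'] st.2))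

-- ===== PORT B =====
-- B: index scan past the leading '>' lines (= dropWhile), then join and strip the slice.
def strip_reply_fallback_alt (body : String) : String :=
  if !(PySem.Str.startswith body ">") then body
  else
    let lines := PySem.Chars.splitOn body.toList ['\n']
    let rest := lines.dropWhile (fun l => PySem.Chars.startswith l ['>'])
    String.ofList (PySem.Chars.strip (PySem.Chars.join ['\n'] rest))

-- ===== PRECONDITION & SPEC =====
def Spec_strip_reply_fallback (body : String) (out : String) : Prop := out = strip_reply_fallback_alt body
instance (body : String) (out : String) : Decidable (Spec_strip_reply_fallback body out) := by unfold Spec_strip_reply_fallback; infer_instance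

-- ===== CLAIM (what is proved, stated in full; the proofs are below) =====
def Claim_equal_strip_reply_fallback : Prop := ∀ (body : String), Dom_strip_reply_fallback body → Spec_strip_reply_fallback body (strip_reply_fallback body)

-- ===== LEMMAS AND PROOFS =====

-- With past_quote already set, A's loop just appends every remaining line.
theorem pvFoldA_true (ls : List (List Char)) (acc : List (List Char)) :
    ls.foldl pvStepA (true, acc) = (true, acc ++ ls) := by
  induction ls generalizing acc with
  | nil => simp
  | cons x xs ih => simp [List.foldl_cons, pvStepA, ih]

-- Characterisation of A's accumulated lines in terms of dropWhile.
theorem pvFoldA_char (ls : List (List Char)) :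
    (ls.foldl pvStepA (false, [])).2 =
      (match ls.dropWhile (fun l => PySem.Chars.startswith l ['>']) with
       | [] => []
       | r :: rs => (if PySem.Chars.strip r ≠ [] then [r] else []) ++ rs) := by
  induction ls with
  | nil => simp
  | cons x xs ih =>
    by_cases hx : PySem.Chars.startswith x ['>'] = true
    · simp [List.foldl_cons, pvStepA, hx, ih]
    · simp only [List.foldl_cons, pvStepA, Bool.not_eq_true] at hx ⊢
      rw [if_neg (by simp), if_pos (by simp [hx])]
      rw [pvFoldA_true]
      simp [hx]

-- strip r = [] means every character of r is whitespace.
theorem pvStrip_nil_all_space (r : List Char) (h : PySem.Chars.strip r = []) :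
    ∀ c ∈ r, PySem.Chars.isspace c = true := by
  have hl : PySem.Chars.lstrip r = [] := by
    cases hd : PySem.Chars.lstrip r with
    | nil => rfl
    | cons y ys =>
      exfalso
      have hy : PySem.Chars.isspace y = false := by
        have := List.head_dropWhile_not (p := PySem.Chars.isspace) (l := r)
          (by simp only [PySem.Chars.lstrip] at hd; simp [hd])
        simp only [PySem.Chars.lstrip] at hd
        simpa [hd] using this
      unfold PySem.Chars.strip PySem.Chars.rstrip at h
      rw [List.reverse_eq_nil_iff] at h
      have := List.dropWhile_eq_nil_iff.mp h y (by simp [hd])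
      simp [hy] at this
  intro c hc
  have hsplit := List.takeWhile_append_dropWhile (p := PySem.Chars.isspace) (l := r)
  unfold PySem.Chars.lstrip at hl
  rw [hl, List.append_nil] at hsplit
  rw [← hsplit] at hc
  exact List.mem_takeWhile_imp hc

-- A fully-whitespace first line disappears under the final strip.
theorem pvStrip_join_blank (r : List Char) (rs : List (List Char))
    (h : PySem.Chars.strip r = []) :
    PySem.Chars.strip (PySem.Chars.join ['\n'] (r :: rs)) =
      PySem.Chars.strip (PySem.Chars.join ['\n'] rs) := by
  have hall := pvStrip_nil_all_space r h
  have hdrop : List.dropWhile PySem.Chars.isspace r = [] :=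
    List.dropWhile_eq_nil_iff.mpr hall
  cases rs with
  | nil =>
    rw [PySem.Chars.join_singleton, PySem.Chars.join_nil, h]
    rfl
  | cons x xs =>
    rw [PySem.Chars.join_cons_cons]
    unfold PySem.Chars.strip PySem.Chars.lstrip
    rw [List.append_assoc, List.dropWhile_append, hdrop]
    simp [show PySem.Chars.isspace '\n' = true from by decide]

-- ===== VERDICT (by name: the statement is the Claim_ definition above) =====
theorem strip_reply_fallback_spec : Claim_equal_strip_reply_fallback := by
  intro body _
  unfold Spec_strip_reply_fallback strip_reply_fallback strip_reply_fallback_alt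
  simp only [PySem.Str.startswith_eq]
  rw [show (">" : String).toList = ['>'] from by decide]
  by_cases hc : PySem.Chars.startswith body.toList ['>'] = true
  · rw [if_neg (by simp [hc]), if_neg (by simp [hc])]
    refine congrArg String.ofList ?_
    rw [pvFoldA_char]
    cases hd : (PySem.Chars.splitOn body.toList ['\n']).dropWhile
        (fun l => PySem.Chars.startswith l ['>']) with
    | nil => rfl
    | cons r rs =>
      by_cases hr : PySem.Chars.strip r = []
      · simp only [hr, ne_eq, not_true_eq_false, if_false, List.nil_append]
        rw [pvStrip_join_blank r rs hr]
      · simp [hr]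
  · rw [if_pos (by simp [hc]), if_pos (by simp [hc])]
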